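-- pv_equiv track=rewrite | github.com/loop0919/aiblecode-problem | problem/99_challenge/99_b/codes/generate.py | solve
-- ===== SOURCE A (Python) =====
-- def solve(N, M, C):
--     alice_cache = {}
--     bob_cache = {}
--
--     def alice(i, diff):
--         if i >= N:
--             return diff >= 0
--
--         if (i, diff) in alice_cache:
--             return alice_cache[(i, diff)]
--
--         result = False
--         cnt = 0
--         for j in range(M):
--             if i + j >= N:
--                 break
--
--             cnt += 1 if C[i + j] == "o" else 0
--             if bob(i + j + 1, diff + cnt) == False:
--                 result = True
--                 break
--
--         alice_cache[(i, diff)] = result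
--         return result
--
--     def bob(i, diff):
--         if i >= N:
--             return diff <= 0
--
--         if (i, diff) in bob_cache:
--             return bob_cache[(i, diff)]
--
--         result = False
--         cnt = 0
--         for j in range(M):
--             if i + j >= N:
--                 break
--
--             cnt += 1 if C[i + j] == "o" else 0
--             if alice(i + j + 1, diff - cnt) == False:
--                 result = True
--                 break
--
--         bob_cache[(i, diff)] = result
--         return result
--
--     return "Alice" if alice(0, 0) else "Bob"
-- ===== SOURCE B (Python) =====
-- def solve(N, M, C):
--     # Mirror symmetry: bob(i, d) == alice(i, -d), so one memoized function suffices.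
--     cache = {}
--
--     def alice(i, diff):
--         if i >= N:
--             return diff >= 0
--         key = (i, diff)
--         if key not in cache:
--             result = False
--             cnt = 0
--             for j in range(max(0, min(M, N - i))):
--                 cnt += 1 if C[i + j] == "o" else 0
--                 if not alice(i + j + 1, -(diff + cnt)):
--                     result = True
--                     break
--             cache[key] = result
--         return cache[key]
--
--     return "Alice" if alice(0, 0) else "Bob"
-- ===== Notes on version B (the rewrite author's own statement) =====
-- stated objective: simpler
-- what changed: Collapses A's two mutually recursive memoized functions (alice/bob with two caches) into one self-recursive memoized function via the mirror symmetry bob(i,d)=alice(i,-d), and replaces the in-loop bounds break by an exact loop bound min(M, N-i).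
import Mathlib
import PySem

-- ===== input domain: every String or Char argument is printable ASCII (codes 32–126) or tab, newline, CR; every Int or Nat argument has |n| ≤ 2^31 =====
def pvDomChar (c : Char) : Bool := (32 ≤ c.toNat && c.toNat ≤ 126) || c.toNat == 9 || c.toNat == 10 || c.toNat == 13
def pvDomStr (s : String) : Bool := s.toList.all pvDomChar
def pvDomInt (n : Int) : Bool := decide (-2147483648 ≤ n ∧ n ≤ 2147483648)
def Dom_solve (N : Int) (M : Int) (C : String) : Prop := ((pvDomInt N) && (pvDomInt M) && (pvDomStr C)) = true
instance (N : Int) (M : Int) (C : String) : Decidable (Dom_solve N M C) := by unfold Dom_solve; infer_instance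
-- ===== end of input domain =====

-- B collapses A's mutually recursive alice/bob pair into one self-recursive function via the
-- mirror symmetry bob(i, d) = alice(i, -d), and replaces the in-loop bounds break by an exact
-- loop bound min(M, N - i); objective: simpler. Return-value equivalence only (both memoize
-- internally; no argument is mutated). The Python caches are pure memoization and are dropped
-- in the ports (value-identical). The fuel argument (N.toNat + 1) is a totality guard only:
-- i increases by at least 1 per fuel unit, so with i < N it is never exhausted.

-- ===== PORT A =====
mutual
-- alice(i, diff) of A; fuel g is consumed when entering the loop body.
def pvAlice (N M : Int) (cs : List Char) : Nat → Int → Int → Bool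
  | f, i, diff =>
    if N ≤ i then decide (0 ≤ diff)
    else match f with
      | 0 => false
      | g + 1 => pvALoop N M cs g i diff M.toNat 0 0
termination_by f _ _ => (f, 0, 0)

-- A's loop in alice: k iterations of `for j in range(M)` remain; current j and cnt.
def pvALoop (N M : Int) (cs : List Char) : Nat → Int → Int → Nat → Int → Int → Bool
  | _, _, _, 0, _, _ => false
  | f, i, diff, k + 1, j, cnt =>
    if N ≤ i + j then false
    else
      let cnt' := cnt + (if PySem.List.pyGet? cs (i + j) == some 'o' then 1 else 0)
      if pvBob N M cs f (i + j + 1) (diff + cnt') = false then true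
      else pvALoop N M cs f i diff k (j + 1) cnt'
termination_by f _ _ k _ _ => (f, 1, k)

def pvBob (N M : Int) (cs : List Char) : Nat → Int → Int → Bool
  | f, i, diff =>
    if N ≤ i then decide (diff ≤ 0)
    else match f with
      | 0 => false
      | g + 1 => pvBLoop N M cs g i diff M.toNat 0 0
termination_by f _ _ => (f, 0, 0)

def pvBLoop (N M : Int) (cs : List Char) : Nat → Int → Int → Nat → Int → Int → Bool
  | _, _, _, 0, _, _ => false
  | f, i, diff, k + 1, j, cnt =>
    if N ≤ i + j then false
    else
      let cnt' := cnt + (if PySem.List.pyGet? cs (i + j) == some 'o' then 1 else 0)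
      if pvAlice N M cs f (i + j + 1) (diff - cnt') = false then true
      else pvBLoop N M cs f i diff k (j + 1) cnt'
termination_by f _ _ k _ _ => (f, 1, k)
end

def solve (N : Int) (M : Int) (C : String) : String :=
  if pvAlice N M C.toList (N.toNat + 1) 0 0 then "Alice" else "Bob"

-- ===== PORT B =====
mutual
def pvAliceAlt (N M : Int) (cs : List Char) : Nat → Int → Int → Bool
  | f, i, diff =>
    if N ≤ i then decide (0 ≤ diff)
    else match f with
      | 0 => false
      | g + 1 => pvAltLoop N M cs g i diff (max 0 (min M (N - i))).toNat 0 0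
termination_by f _ _ => (f, 0, 0)

-- B's loop: exactly max(0, min(M, N - i)) iterations, no in-loop bounds check.
def pvAltLoop (N M : Int) (cs : List Char) : Nat → Int → Int → Nat → Int → Int → Bool
  | _, _, _, 0, _, _ => false
  | f, i, diff, k + 1, j, cnt =>
    let cnt' := cnt + (if PySem.List.pyGet? cs (i + j) == some 'o' then 1 else 0)
    if pvAliceAlt N M cs f (i + j + 1) (-(diff + cnt')) = false then true
    else pvAltLoop N M cs f i diff k (j + 1) cnt'
termination_by f _ _ k _ _ => (f, 1, k)
end

def solve_alt (N : Int) (M : Int) (C : String) : String :=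
  if pvAliceAlt N M C.toList (N.toNat + 1) 0 0 then "Alice" else "Bob"

-- ===== PRECONDITION & SPEC =====
-- Pre_ excludes exactly the inputs where A (and B alike) raises IndexError: the game indexes
-- C[0..N-1], so it raises iff 0 < N, 0 < M and N > len(C).
def Pre_solve (N : Int) (M : Int) (C : String) : Prop :=
  N ≤ (C.length : Int) ∨ N ≤ 0 ∨ M ≤ 0
instance (N : Int) (M : Int) (C : String) : Decidable (Pre_solve N M C) := by
  unfold Pre_solve; infer_instance

def pvWitness_solve : Int × Int × String := (3, 2, "oxo")

def Spec_solve (N : Int) (M : Int) (C : String) (out : String) : Prop := out = solve_alt N M C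
instance (N : Int) (M : Int) (C : String) (out : String) : Decidable (Spec_solve N M C out) := by
  unfold Spec_solve; infer_instance

-- ===== CLAIM (what is proved, stated in full; the proofs are below) =====
def Claim_equal_solve : Prop := ∀ (N : Int) (M : Int) (C : String), Dom_solve N M C → Pre_solve N M C → Spec_solve N M C (solve N M C)

-- ===== LEMMAS AND PROOFS =====

-- Main symmetry lemma: A's alice agrees with B's alice, and A's bob is B's alice mirrored,
-- at every fuel (both return false on exhausted fuel). The loop lemmas relate A's break-guarded
-- loop counter k to B's exact remaining count min k (N - (i+j)).toNat.
theorem pv_main (N M : Int) (cs : List Char) :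
    ∀ (f : Nat),
      (∀ (i d : Int), pvAlice N M cs f i d = pvAliceAlt N M cs f i d) ∧
      (∀ (i d : Int), pvBob N M cs f i d = pvAliceAlt N M cs f i (-d)) := by
  intro f
  induction f with
  | zero =>
    constructor <;> intro i d <;> simp only [pvAlice, pvBob, pvAliceAlt] <;>
      by_cases h : N ≤ i <;> simp [h]
  | succ g ih =>
    obtain ⟨ihA, ihB⟩ := ih
    have hA : ∀ (k : Nat) (i d j c : Int),
        pvALoop N M cs g i d k j c
          = pvAltLoop N M cs g i d (min k (N - (i + j)).toNat) j c := by
      intro k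
      induction k with
      | zero => intro i d j c; simp [pvALoop, pvAltLoop]
      | succ k ihk =>
        intro i d j c
        by_cases h : N ≤ i + j
        · have hm : min (k + 1) (N - (i + j)).toNat = 0 := by omega
          rw [hm]
          simp [pvALoop, pvAltLoop, h]
        · have hm : min (k + 1) (N - (i + j)).toNat
              = min k (N - (i + (j + 1))).toNat + 1 := by omega
          rw [hm]
          simp only [pvALoop, pvAltLoop, if_neg h]
          rw [ihB, ihk]
    have hB : ∀ (k : Nat) (i d j c : Int),
        pvBLoop N M cs g i d k j c
          = pvAltLoop N M cs g i (-d) (min k (N - (i + j)).toNat) j c := by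
      intro k
      induction k with
      | zero => intro i d j c; simp [pvBLoop, pvAltLoop]
      | succ k ihk =>
        intro i d j c
        by_cases h : N ≤ i + j
        · have hm : min (k + 1) (N - (i + j)).toNat = 0 := by omega
          rw [hm]
          simp [pvBLoop, pvAltLoop, h]
        · have hm : min (k + 1) (N - (i + j)).toNat
              = min k (N - (i + (j + 1))).toNat + 1 := by omega
          rw [hm]
          simp only [pvBLoop, pvAltLoop, if_neg h]
          rw [show ∀ x : Int, -(-d + x) = d - x from fun x => by ring]
          rw [ihA, ihk]
    constructor <;> intro i d
    · simp only [pvAlice, pvAliceAlt]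
      by_cases h : N ≤ i
      · simp [h]
      · rw [if_neg h, if_neg h, hA]
        congr 1
        omega
    · simp only [pvBob, pvAliceAlt]
      by_cases h : N ≤ i
      · simp only [if_pos h]
        simp
      · rw [if_neg h, if_neg h, hB]
        congr 1
        omega

-- ===== VERDICT (by name: the statement is the Claim_ definition above) =====
theorem solve_spec : Claim_equal_solve := by
  intro N M C _ _
  unfold Spec_solve solve solve_alt
  rw [(pv_main N M C.toList (N.toNat + 1)).1]
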